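-- pv_equiv track=rewrite | github.com/benlagrone/solar-potential-backend | live_conditions.py | _build_recent_headlines
-- ===== SOURCE A (Python) =====
-- from typing import Any, Optional
--
-- def _extract_alert_headline(message: str) -> str:
--     for raw_line in (message or "").splitlines():
--         line = raw_line.strip()
--         if not line:
--             continue
--         if any(token in line for token in ("WARNING:", "WATCH:", "ALERT:")):
--             return line
--     return ""
--
-- def _categorize_alert_level(headline: str) -> str:
--     upper_headline = headline.upper()
--     if "WARNING:" in upper_headline:
--         return "warning"
--     if "WATCH:" in upper_headline:
--         return "watch"
--     if "ALERT:" in upper_headline: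
--         return "alert"
--     return "info"
--
-- def _build_recent_headlines(alerts_payload: Any) -> tuple[int, int, int, list[str]]:
--     warning_count = 0
--     watch_count = 0
--     alert_count = 0
--     headlines: list[str] = []
--
--     if not isinstance(alerts_payload, list):
--         return warning_count, watch_count, alert_count, headlines
--
--     for item in alerts_payload:
--         headline = _extract_alert_headline(str(item.get("message") or ""))
--         if not headline:
--             continue
--         level = _categorize_alert_level(headline)
--         if level == "warning":
--             warning_count += 1
--         elif level == "watch":
--             watch_count += 1
--         elif level == "alert":
--             alert_count += 1
--         if len(headlines) < 3:
--             headlines.append(headline)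
--
--     return warning_count, watch_count, alert_count, headlines
-- ===== SOURCE B (Python) =====
-- def _build_recent_headlines(alerts_payload):
--     warning_count = 0
--     watch_count = 0
--     alert_count = 0
--
--     if not isinstance(alerts_payload, list):
--         return warning_count, watch_count, alert_count, []
--
--     # One pass: collect ALL matching headlines (first stripped line holding a token).
--     headlines = []
--     for item in alerts_payload:
--         for raw_line in str(item.get("message") or "").splitlines():
--             line = raw_line.strip()
--             if line and any(token in line for token in ("WARNING:", "WATCH:", "ALERT:")):
--                 headlines.append(line)
--                 break
--
--     # Counts as separate reductions over the full headline list.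
--     warning_count = sum(1 for h in headlines if "WARNING:" in h.upper())
--     watch_count = sum(1 for h in headlines
--                       if "WATCH:" in h.upper() and "WARNING:" not in h.upper())
--     alert_count = sum(1 for h in headlines
--                       if "ALERT:" in h.upper()
--                       and "WARNING:" not in h.upper() and "WATCH:" not in h.upper())
--
--     return warning_count, watch_count, alert_count, headlines[:3]
-- ===== Notes on version B (the rewrite author's own statement) =====
-- stated objective: alternative
-- what changed: A interleaves counting and capped headline collection in one stateful loop with an if/elif level chain; B first builds the full list of extracted headlines in one pass, then computes the three counts as separate sum() reductions over that list and slices headlines[:3] only at the end.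
import Mathlib
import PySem

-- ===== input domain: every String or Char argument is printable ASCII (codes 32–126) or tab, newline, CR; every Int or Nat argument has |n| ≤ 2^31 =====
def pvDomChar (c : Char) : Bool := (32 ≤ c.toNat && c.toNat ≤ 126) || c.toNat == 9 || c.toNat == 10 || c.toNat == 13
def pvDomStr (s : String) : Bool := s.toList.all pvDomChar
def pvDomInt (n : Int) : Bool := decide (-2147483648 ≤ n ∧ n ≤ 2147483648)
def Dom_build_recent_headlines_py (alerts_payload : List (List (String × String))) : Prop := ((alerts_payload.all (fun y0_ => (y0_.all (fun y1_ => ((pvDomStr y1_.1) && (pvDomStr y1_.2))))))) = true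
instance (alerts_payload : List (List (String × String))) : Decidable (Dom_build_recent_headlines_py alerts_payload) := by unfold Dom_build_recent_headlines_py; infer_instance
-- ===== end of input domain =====

-- B separates the work into one extraction pass building the full headline list and
-- three independent count reductions, slicing to 3 only at the end (objective: alternative decomposition).

-- ===== PORT A =====
-- str(item.get("message") or "") : first-match lookup; a missing key or empty string gives ""
def pvMessageOf (item : List (String × String)) : String :=
  match item.find? (fun p => p.1 == "message") with
  | some p => if p.2 = "" then "" else p.2
  | none => ""

-- _extract_alert_headline's loop over (message or "").splitlines()
def pvExtractA : List String → String
  | [] => ""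
  | raw :: rest =>
    let line := PySem.Str.strip raw
    if line = "" then pvExtractA rest
    else if ["WARNING:", "WATCH:", "ALERT:"].any (fun tok => PySem.Str.isIn tok line)
      then line
      else pvExtractA rest

def pvCategorizeA (headline : String) : String :=
  let u := PySem.Str.upper headline
  if PySem.Str.isIn "WARNING:" u then "warning"
  else if PySem.Str.isIn "WATCH:" u then "watch"
  else if PySem.Str.isIn "ALERT:" u then "alert"
  else "info"

def pvStepA (st : Int × Int × Int × List String) (item : List (String × String)) :
    Int × Int × Int × List String :=
  let (w, wa, al, hs) := st
  let headline := pvExtractA (PySem.Str.splitlines (pvMessageOf item))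
  if headline = "" then (w, wa, al, hs)
  else
    let lvl := pvCategorizeA headline
    let w := if lvl = "warning" then w + 1 else w
    let wa := if lvl ≠ "warning" ∧ lvl = "watch" then wa + 1 else wa
    let al := if lvl ≠ "warning" ∧ lvl ≠ "watch" ∧ lvl = "alert" then al + 1 else al
    let hs := if hs.length < 3 then hs ++ [headline] else hs
    (w, wa, al, hs)

def build_recent_headlines_py (alerts_payload : List (List (String × String))) :
    Int × Int × Int × List String :=
  alerts_payload.foldl pvStepA (0, 0, 0, [])

-- ===== PORT B =====
-- inner loop of B: first stripped non-empty line containing a token (the `break`), else nothing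
def pvExtractB : List String → Option String
  | [] => none
  | raw :: rest =>
    let line := PySem.Str.strip raw
    if line ≠ "" ∧ ["WARNING:", "WATCH:", "ALERT:"].any (fun tok => PySem.Str.isIn tok line)
      then some line
      else pvExtractB rest

def pvHeadlineOf (item : List (String × String)) : Option String :=
  pvExtractB (PySem.Str.splitlines (pvMessageOf item))

def pvIsWarning (h : String) : Bool := PySem.Str.isIn "WARNING:" (PySem.Str.upper h)
def pvIsWatch (h : String) : Bool := PySem.Str.isIn "WATCH:" (PySem.Str.upper h)
def pvIsAlert (h : String) : Bool := PySem.Str.isIn "ALERT:" (PySem.Str.upper h)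

def build_recent_headlines_py_alt (alerts_payload : List (List (String × String))) :
    Int × Int × Int × List String :=
  let headlines := alerts_payload.filterMap pvHeadlineOf
  let warning_count : Int := (headlines.countP (fun h => pvIsWarning h) : Nat)
  let watch_count : Int := (headlines.countP (fun h => !pvIsWarning h && pvIsWatch h) : Nat)
  let alert_count : Int :=
    (headlines.countP (fun h => !pvIsWarning h && !pvIsWatch h && pvIsAlert h) : Nat)
  (warning_count, watch_count, alert_count, headlines.take 3)

-- ===== PRECONDITION & SPEC =====
def Spec_build_recent_headlines_py (alerts_payload : List (List (String × String))) (out : Int × Int × Int × List String) : Prop := out = build_recent_headlines_py_alt alerts_payload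
instance (alerts_payload : List (List (String × String))) (out : Int × Int × Int × List String) : Decidable (Spec_build_recent_headlines_py alerts_payload out) := by unfold Spec_build_recent_headlines_py; infer_instance

-- ===== CLAIM (what is proved, stated in full; the proofs are below) =====
def Claim_equal_build_recent_headlines_py : Prop := ∀ (alerts_payload : List (List (String × String))), Dom_build_recent_headlines_py alerts_payload → Spec_build_recent_headlines_py alerts_payload (build_recent_headlines_py alerts_payload)

-- ===== LEMMAS AND PROOFS =====

-- the two extraction loops agree: B's Option form is A's empty-string sentinel
lemma extractB_eq (ls : List String) :
    pvExtractB ls = if pvExtractA ls = "" then none else some (pvExtractA ls) := by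
  induction ls with
  | nil => simp [pvExtractA, pvExtractB]
  | cons raw rest ih =>
    simp only [pvExtractA, pvExtractB]
    split_ifs with h0 h1 h2 h3 h4 h5 h6 <;> simp_all

-- one counter component of A's step matches one 0/1 count of B, given the level test
lemma count_step (P : Prop) [Decidable P] (b : Bool) (hP : P ↔ b = true) (x : Int) (c : Nat) :
    (if P then x + 1 else x) + (c : Int) = x + (((c + if b then 1 else 0) : Nat) : Int) := by
  by_cases h : P
  · simp [h, hP.mp h]; ring
  · have hb : b = false := by
      rcases Bool.eq_false_or_eq_true b with hb | hb
      · exact absurd (hP.mpr hb) h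
      · exact hb
    simp [h, hb]

-- level tests in A's step are B's three predicates
lemma cat_warning (h : String) : (pvCategorizeA h = "warning") ↔ pvIsWarning h = true := by
  simp only [pvCategorizeA, pvIsWarning]
  split_ifs <;> simp_all
lemma cat_watch (h : String) :
    (pvCategorizeA h ≠ "warning" ∧ pvCategorizeA h = "watch") ↔
      (!pvIsWarning h && pvIsWatch h) = true := by
  simp only [pvCategorizeA, pvIsWarning, pvIsWatch]
  split_ifs <;> simp_all
lemma cat_alert (h : String) :
    (pvCategorizeA h ≠ "warning" ∧ pvCategorizeA h ≠ "watch" ∧ pvCategorizeA h = "alert") ↔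
      (!pvIsWarning h && !pvIsWatch h && pvIsAlert h) = true := by
  simp only [pvCategorizeA, pvIsWarning, pvIsWatch, pvIsAlert]
  split_ifs <;> simp_all

-- the loop invariant: A's fold from any state, described by B's reductions over the rest
lemma foldA_invariant (l : List (List (String × String))) (w wa al : Int) (hs : List String) :
    l.foldl pvStepA (w, wa, al, hs) =
      (w + ((l.filterMap pvHeadlineOf).countP (fun h => pvIsWarning h) : Nat),
       wa + ((l.filterMap pvHeadlineOf).countP (fun h => !pvIsWarning h && pvIsWatch h) : Nat),
       al + ((l.filterMap pvHeadlineOf).countP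
              (fun h => !pvIsWarning h && !pvIsWatch h && pvIsAlert h) : Nat),
       hs ++ (l.filterMap pvHeadlineOf).take (3 - hs.length)) := by
  induction l generalizing w wa al hs with
  | nil => simp
  | cons item rest ih =>
    have hstep : List.foldl pvStepA (w, wa, al, hs) (item :: rest)
        = List.foldl pvStepA (pvStepA (w, wa, al, hs) item) rest := rfl
    rw [hstep]
    have hB : pvHeadlineOf item =
        if pvExtractA (PySem.Str.splitlines (pvMessageOf item)) = "" then none
        else some (pvExtractA (PySem.Str.splitlines (pvMessageOf item))) := by
      simp [pvHeadlineOf, extractB_eq]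
    by_cases hemp : pvExtractA (PySem.Str.splitlines (pvMessageOf item)) = ""
    · have hskip : pvStepA (w, wa, al, hs) item = (w, wa, al, hs) := by
        simp [pvStepA, hemp]
      rw [hskip, ih]
      simp [hB, hemp]
    · set hl := pvExtractA (PySem.Str.splitlines (pvMessageOf item)) with hhl
      have hstep2 : pvStepA (w, wa, al, hs) item =
          ((if pvCategorizeA hl = "warning" then w + 1 else w),
           (if pvCategorizeA hl ≠ "warning" ∧ pvCategorizeA hl = "watch" then wa + 1 else wa),
           (if pvCategorizeA hl ≠ "warning" ∧ pvCategorizeA hl ≠ "watch" ∧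
               pvCategorizeA hl = "alert" then al + 1 else al),
           (if hs.length < 3 then hs ++ [hl] else hs)) := by
        simp only [pvStepA]
        rw [← hhl]
        simp [hemp]
      rw [hstep2, ih]
      have hfm : (item :: rest).filterMap pvHeadlineOf = hl :: rest.filterMap pvHeadlineOf := by
        simp [hB, hemp]
      rw [hfm]
      refine Prod.ext ?_ (Prod.ext ?_ (Prod.ext ?_ ?_)) <;> simp only [List.countP_cons]
      · exact count_step _ _ (cat_warning hl) w _
      · exact count_step _ _ (cat_watch hl) wa _
      · exact count_step _ _ (cat_alert hl) al _
      · by_cases hlen : hs.length < 3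
        · have h1 : 3 - hs.length = (3 - (hs.length + 1)) + 1 := by omega
          simp [hlen, h1, List.take_succ_cons]
        · have h1 : 3 - hs.length = 0 := by omega
          simp [hlen, h1]

-- ===== VERDICT (by name: the statement is the Claim_ definition above) =====
theorem build_recent_headlines_py_spec : Claim_equal_build_recent_headlines_py := by
  intro alerts _
  show build_recent_headlines_py alerts = build_recent_headlines_py_alt alerts
  rw [build_recent_headlines_py, foldA_invariant, build_recent_headlines_py_alt]
  simp
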